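-- pv_equiv track=rewrite | github.com/sqdwrd/BaekJoon | 2775.py | search
-- ===== SOURCE A (Python) =====
-- mem = dict()
--
-- def search(a, b):
--     if (a == 0): return b
--     if (b == 1): return 1
--
--     try:
--         return mem[a][b]
--     except KeyError:
--         result =  search(a - 1, b) + search(a, b - 1)
--         try:
--             mem[a][b] = result
--         except KeyError:
--             mem[a] = {}
--             mem[a][b] = result
--         return result
-- ===== SOURCE B (Python) =====
-- def search(a, b):
--     if a == 0:
--         return b
--     if b == 1:
--         return 1
--     # search(a, b) = C(a+b, b-1): compute the binomial coefficient directly,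
--     # multiplying/dividing one factor at a time (exact at every step).
--     acc = 1
--     for i in range(1, b):
--         acc = acc * (a + 1 + i) // i
--     return acc
-- ===== Notes on version B (the rewrite author's own statement) =====
-- stated objective: faster
-- what changed: replaces the memoized two-variable recursion by the closed-form binomial coefficient C(a+b, b-1), computed with a single multiplicative loop of length b-1
import Mathlib
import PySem

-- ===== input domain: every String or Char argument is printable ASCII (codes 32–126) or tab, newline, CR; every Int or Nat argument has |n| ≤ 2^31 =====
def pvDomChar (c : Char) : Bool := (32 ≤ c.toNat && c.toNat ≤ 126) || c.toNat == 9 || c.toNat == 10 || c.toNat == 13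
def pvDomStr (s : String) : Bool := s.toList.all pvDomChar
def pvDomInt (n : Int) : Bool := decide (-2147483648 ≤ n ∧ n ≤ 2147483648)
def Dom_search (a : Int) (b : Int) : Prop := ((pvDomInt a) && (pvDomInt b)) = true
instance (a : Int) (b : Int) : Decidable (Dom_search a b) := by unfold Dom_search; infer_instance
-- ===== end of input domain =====

-- B replaces A's memoized recursion by the closed-form binomial C(a+b, b-1) computed in one
-- multiplicative loop (objective: faster, asymptotic). Equivalence is about return values only
-- (A also mutates the global memo dict; B keeps no state).

-- ===== PORT A =====
-- A's global `mem` is threaded through the recursion as explicit state; each top-level call of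
-- the port starts from the empty memo (the memo only caches values, it does not change results).
-- Python's dict is a hash map; the memo is modelled by Std.HashMap (same get/insert semantics).
-- `fuel` only makes the recursion total; it is always sufficient on Pre_ (see searchMemo_eq).
def searchMemo : Nat → Int → Int → Std.HashMap Int (Std.HashMap Int Int) →
    Int × Std.HashMap Int (Std.HashMap Int Int)
  | 0, _, _, mem => (0, mem)
  | fuel+1, a, b, mem =>
    if a = 0 then (b, mem)
    else if b = 1 then (1, mem)
    else
      match (mem[a]?).bind (fun d => d[b]?) with
      | some v => (v, mem)            -- try: return mem[a][b]
      | none =>                       -- except KeyError: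
        let p1 := searchMemo fuel (a - 1) b mem
        let p2 := searchMemo fuel a (b - 1) p1.2
        let result := p1.1 + p2.1
        match p2.2[a]? with
        | some d => (result, p2.2.insert a (d.insert b result))   -- mem[a][b] = result
        | none => (result, p2.2.insert a ((∅ : Std.HashMap Int Int).insert b result))  -- mem[a] = {}; mem[a][b] = result

def search (a : Int) (b : Int) : Int :=
  (searchMemo ((a + b).toNat + 1) a b ∅).1

-- ===== PORT B =====
def search_alt (a : Int) (b : Int) : Int :=
  if a = 0 then b
  else if b = 1 then 1
  else (PySem.List.pyRange 1 b 1).foldl (fun acc i => PySem.Int.floordiv (acc * (a + 1 + i)) i) 1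

-- ===== PRECONDITION & SPEC =====
-- Pre_ excludes exactly the inputs on which A recurses forever (RecursionError):
-- a > 0 with b ≤ 0, or a < 0 with b ≥ 2.
def Pre_search (a : Int) (b : Int) : Prop := a = 0 ∨ b = 1 ∨ (1 ≤ a ∧ 1 ≤ b)
instance (a : Int) (b : Int) : Decidable (Pre_search a b) := by unfold Pre_search; infer_instance
def pvWitness_search : Int × Int := (3, 4)

def Spec_search (a : Int) (b : Int) (out : Int) : Prop := out = search_alt a b
instance (a : Int) (b : Int) (out : Int) : Decidable (Spec_search a b out) := by unfold Spec_search; infer_instance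

-- ===== CLAIM (what is proved, stated in full; the proofs are below) =====
def Claim_equal_search : Prop := ∀ (a : Int) (b : Int), Dom_search a b → Pre_search a b → Spec_search a b (search a b)

-- ===== LEMMAS AND PROOFS =====

-- The common specification: both ports compute this value on Pre_.
def Fspec (a b : Int) : Int :=
  if a = 0 then b
  else if b = 1 then 1
  else ((a + b).toNat.choose (b - 1).toNat : Int)

-- the raw binomial
def G (a b : Int) : Int := ((a + b).toNat.choose (b - 1).toNat : Int)

lemma Fspec_eq_G (a b : Int) (ha : 0 ≤ a) (hb : 1 ≤ b) : Fspec a b = G a b := by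
  unfold Fspec G
  split_ifs with h0 h1
  · subst h0
    have hbn : (0 + b).toNat = b.toNat := by omega
    have hb1 : (b - 1).toNat = b.toNat - 1 := by omega
    rw [hbn, hb1, Nat.choose_symm (by omega : 1 ≤ b.toNat), Nat.choose_one_right]
    omega
  · subst h1
    simp
  · rfl

lemma G_pascal (a b : Int) (ha : 1 ≤ a) (hb : 2 ≤ b) :
    G (a - 1) b + G a (b - 1) = G a b := by
  unfold G
  have h1 : (a - 1 + b).toNat = (a + b - 1).toNat := by omega
  have h2 : (a + (b - 1)).toNat = (a + b - 1).toNat := by omega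
  have h3 : (b - 1 - 1).toNat = (b - 2).toNat := by omega
  have h4 : (a + b).toNat = (a + b - 1).toNat + 1 := by omega
  have h5 : (b - 1).toNat = (b - 2).toNat + 1 := by omega
  rw [h1, h2, h3, h4, h5, Nat.choose_succ_succ]
  push_cast
  ring

-- the memo only ever stores correct values
def GoodMemo (mem : Std.HashMap Int (Std.HashMap Int Int)) : Prop :=
  ∀ x y v, ((mem[x]?).bind (fun d => d[y]?)) = some v → v = Fspec x y

lemma goodMemo_empty : GoodMemo (∅ : Std.HashMap Int (Std.HashMap Int Int)) := by
  intro x y v h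
  simp at h

lemma searchMemo_eq (fuel : Nat) : ∀ (a b : Int) (mem : Std.HashMap Int (Std.HashMap Int Int)),
    GoodMemo mem → 0 ≤ a → 1 ≤ b → (a + b).toNat < fuel →
    (searchMemo fuel a b mem).1 = Fspec a b ∧ GoodMemo (searchMemo fuel a b mem).2 := by
  induction fuel with
  | zero => intro a b mem _ _ _ hf; omega
  | succ fuel ih =>
    intro a b mem hgood ha hb hf
    by_cases h0 : a = 0
    · subst h0; simp [searchMemo, Fspec, hgood]
    by_cases h1 : b = 1
    · subst h1; simp [searchMemo, Fspec, h0, hgood]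
    have ha1 : 1 ≤ a := by omega
    have hb2 : 2 ≤ b := by omega
    have hlook : (searchMemo (fuel+1) a b mem) =
        match (mem[a]?).bind (fun d => d[b]?) with
        | some v => (v, mem)
        | none =>
          let p1 := searchMemo fuel (a - 1) b mem
          let p2 := searchMemo fuel a (b - 1) p1.2
          let result := p1.1 + p2.1
          match p2.2[a]? with
          | some d => (result, p2.2.insert a (d.insert b result))
          | none => (result, p2.2.insert a ((∅ : Std.HashMap Int Int).insert b result)) := by
      simp [searchMemo, h0, h1]
    rw [hlook]
    cases hm : (mem[a]?).bind (fun d => d[b]?) with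
    | some v =>
      exact ⟨hgood a b v hm, hgood⟩
    | none =>
      have h1c := ih (a - 1) b mem hgood (by omega) (by omega) (by omega)
      have h2c := ih a (b - 1) (searchMemo fuel (a - 1) b mem).2 h1c.2 ha (by omega) (by omega)
      have hgood2 := h2c.2
      have hres : (searchMemo fuel (a - 1) b mem).1
          + (searchMemo fuel a (b - 1) (searchMemo fuel (a - 1) b mem).2).1 = Fspec a b := by
        rw [h1c.1, h2c.1, Fspec_eq_G _ _ (by omega) hb, Fspec_eq_G _ _ ha (by omega),
            Fspec_eq_G a b ha hb]
        exact G_pascal a b ha1 hb2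
      cases hg : (searchMemo fuel a (b - 1) (searchMemo fuel (a - 1) b mem).2).2[a]? with
      | some d =>
        simp only [hg]
        refine ⟨hres, ?_⟩
        intro x y v hxy
        rw [Std.HashMap.getElem?_insert] at hxy
        by_cases hx : x = a
        · subst hx
          simp only [beq_self_eq_true, if_true, Option.bind] at hxy
          rw [Std.HashMap.getElem?_insert] at hxy
          by_cases hy : y = b
          · subst hy
            simp only [beq_self_eq_true, if_true, Option.some_inj] at hxy
            rw [← hxy]; exact hres
          · rw [if_neg (by simp [Ne.symm hy])] at hxy
            exact hgood2 x y v (by rw [hg]; simpa using hxy)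
        · rw [if_neg (by simp [Ne.symm hx])] at hxy
          exact hgood2 x y v hxy
      | none =>
        simp only [hg]
        refine ⟨hres, ?_⟩
        intro x y v hxy
        rw [Std.HashMap.getElem?_insert] at hxy
        by_cases hx : x = a
        · subst hx
          simp only [beq_self_eq_true, if_true, Option.bind] at hxy
          rw [Std.HashMap.getElem?_insert] at hxy
          by_cases hy : y = b
          · subst hy
            simp only [beq_self_eq_true, if_true, Option.some_inj] at hxy
            rw [← hxy]; exact hres
          · rw [if_neg (by simp [Ne.symm hy]), Std.HashMap.getElem?_empty] at hxy
            exact absurd hxy (by simp)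
        · rw [if_neg (by simp [Ne.symm hx])] at hxy
          exact hgood2 x y v hxy

-- B's loop invariant: after running over 1..m the accumulator is C(a+1+m, m).
lemma alt_fold (a : Int) (ha : 1 ≤ a) (m : Nat) :
    (PySem.List.pyRange 1 (1 + (m : Int)) 1).foldl
      (fun acc i => PySem.Int.floordiv (acc * (a + 1 + i)) i) 1
      = ((a + 1 + m).toNat.choose m : Int) := by
  induction m with
  | zero =>
    rw [show (1 : Int) + ((0 : Nat) : Int) = 1 by norm_num,
        PySem.List.pyRange_one_eq_nil le_rfl]
    simp
  | succ m ih =>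
    have hsplit : PySem.List.pyRange 1 (1 + ((m : Nat) + 1 : Nat)) 1 =
        PySem.List.pyRange 1 (1 + (m : Int)) 1 ++ [1 + (m : Int)] := by
      have h : (1 : Int) + ((m : Nat) + 1 : Nat) = (1 + (m : Int)) + 1 := by push_cast; ring
      rw [h, PySem.List.pyRange_one_succ_right (by omega)]
    rw [hsplit, List.foldl_append, ih]
    simp only [List.foldl_cons, List.foldl_nil]
    -- (n+1) * C(n, m) = C(n+1, m+1) * (m+1) with n = (a+1+m).toNat
    have h2 := Nat.add_one_mul_choose_eq (a + 1 + m).toNat m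
    have h2' : (((a + 1 + m).toNat : Int) + 1) * ((a + 1 + m).toNat.choose m : Int) =
        (((a + 1 + m).toNat + 1).choose (m + 1) : Int) * ((m : Int) + 1) := by
      exact_mod_cast h2
    have hn : a + 1 + (1 + (m : Int)) = ((a + 1 + m).toNat : Int) + 1 := by omega
    have h1 : (a + 1 + ((m : Nat) + 1 : Nat)).toNat = (a + 1 + m).toNat + 1 := by
      push_cast; omega
    rw [hn, h1]
    have hmul : ((a + 1 + m).toNat.choose m : Int) * (((a + 1 + m).toNat : Int) + 1) =
        (((a + 1 + m).toNat + 1).choose (m + 1) : Int) * (1 + (m : Int)) := by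
      rw [show (1 : Int) + (m : Int) = (m : Int) + 1 by ring, ← h2']; ring
    rw [hmul, PySem.Int.floordiv_eq_ediv_of_pos (by omega : (0 : Int) < 1 + (m : Int)),
        Int.mul_ediv_cancel _ (by omega : (1 : Int) + (m : Int) ≠ 0)]

lemma search_alt_eq_Fspec (a b : Int) (ha : 0 ≤ a) (hb : 1 ≤ b) :
    search_alt a b = Fspec a b := by
  unfold search_alt Fspec
  split_ifs with h0 h1
  · rfl
  · rfl
  · have ha1 : 1 ≤ a := by omega
    have hb2 : 2 ≤ b := by omega
    have hm : (1 : Int) + ((b - 1).toNat : Int) = b := by omega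
    have hfold := alt_fold a ha1 (b - 1).toNat
    rw [hm] at hfold
    rw [hfold]
    have hnn : (a + 1 + ((b - 1).toNat : Int)).toNat = (a + b).toNat := by omega
    rw [hnn]

lemma search_eq_Fspec (a b : Int) (ha : 0 ≤ a) (hb : 1 ≤ b) :
    search a b = Fspec a b := by
  unfold search
  exact (searchMemo_eq ((a + b).toNat + 1) a b ∅ goodMemo_empty ha hb
    (by omega)).1

-- ===== VERDICT (by name: the statement is the Claim_ definition above) =====
theorem search_spec : Claim_equal_search := by
  intro a b _ hpre
  unfold Spec_search
  rcases hpre with h0 | h1 | ⟨ha, hb⟩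
  · subst h0
    simp [search, searchMemo, search_alt]
  · subst h1
    by_cases h0 : a = 0
    · subst h0; simp [search, searchMemo, search_alt]
    · simp [search, searchMemo, search_alt, h0]
  · rw [search_eq_Fspec a b (by omega) hb, search_alt_eq_Fspec a b (by omega) hb]
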